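-- pv_equiv track=rewrite | github.com/philthinker/MoCapLfD | ActionRecognition/prog_all.py | get_labels_start_end_time
-- ===== SOURCE A (Python) =====
-- def get_labels_start_end_time(frame_wise_labels, bg_class=["background"]):
--     labels = []  # labels是动作标签
--     starts = []  # starts是动作开始的位置
--     ends = []  # end是动作结束的位置
--     last_label = frame_wise_labels[0]
--     if frame_wise_labels[0] not in bg_class:  # 如果标签第一帧不是"background"，labels[0]=第一帧的动作
--         labels.append(frame_wise_labels[0])
--         starts.append(0)
--     for i in range(len(frame_wise_labels)):
--         if frame_wise_labels[i] != last_label: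
--             if frame_wise_labels[i] not in bg_class:
--                 labels.append(frame_wise_labels[i])
--                 starts.append(i)
--             if last_label not in bg_class:
--                 ends.append(i)
--             last_label = frame_wise_labels[i]
--     if last_label not in bg_class:
--         ends.append(i + 1)
--     return labels, starts, ends
-- ===== SOURCE B (Python) =====
-- def get_labels_start_end_time(frame_wise_labels, bg_class=["background"]):
--     # Run-length grouping with two indices: each maximal run of equal labels
--     # yields one (label, start, end) triple unless the label is background.
--     labels, starts, ends = [], [], []
--     n = len(frame_wise_labels)
--     i = 0
--     while i < n:
--         x = frame_wise_labels[i]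
--         j = i + 1
--         while j < n and frame_wise_labels[j] == x:
--             j += 1
--         if x not in bg_class:
--             labels.append(x)
--             starts.append(i)
--             ends.append(j)
--         i = j
--     return labels, starts, ends
-- ===== Notes on version B (the rewrite author's own statement) =====
-- stated objective: alternative
-- what changed: B replaces A's last-label state machine (special-cased first frame, per-frame bg membership tests, post-loop end append) by a two-pointer run-length scan that emits the whole (label, start, end) triple once per maximal run.
import Mathlib
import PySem

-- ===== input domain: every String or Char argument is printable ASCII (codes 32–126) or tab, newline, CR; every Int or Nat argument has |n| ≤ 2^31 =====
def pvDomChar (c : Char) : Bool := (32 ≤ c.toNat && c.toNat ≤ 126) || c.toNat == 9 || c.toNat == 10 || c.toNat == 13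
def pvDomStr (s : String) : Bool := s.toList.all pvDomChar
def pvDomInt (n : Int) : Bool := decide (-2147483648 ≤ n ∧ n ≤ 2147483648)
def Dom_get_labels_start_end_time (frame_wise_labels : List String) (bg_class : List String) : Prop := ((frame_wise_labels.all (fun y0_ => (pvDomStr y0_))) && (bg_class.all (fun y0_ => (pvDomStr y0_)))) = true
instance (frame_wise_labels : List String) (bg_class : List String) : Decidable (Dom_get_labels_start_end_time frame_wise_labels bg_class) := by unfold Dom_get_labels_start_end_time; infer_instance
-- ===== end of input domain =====

-- B replaces A's last-label state machine by a run-length scan that emits one whole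
-- (label, start, end) triple per maximal run (objective: alternative; same cost).

-- ===== PORT A =====
-- loop body of A's `for i in range(len(frame_wise_labels))`
def aStep (bg_class : List String) (frame_wise_labels : List String)
    (s : List String × List Int × List Int × String) (i : Int) :
    List String × List Int × List Int × String :=
  let cur := PySem.List.pyGetD frame_wise_labels i ""
  if cur ≠ s.2.2.2 then
    let labels := if cur ∉ bg_class then s.1 ++ [cur] else s.1
    let starts := if cur ∉ bg_class then s.2.1 ++ [i] else s.2.1
    let ends := if s.2.2.2 ∉ bg_class then s.2.2.1 ++ [i] else s.2.2.1
    (labels, starts, ends, cur)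
  else s

def get_labels_start_end_time (frame_wise_labels : List String) (bg_class : List String) : List String × List Int × List Int :=
  -- frame_wise_labels[0]; Pre_ excludes [], where Python raises IndexError
  let first := frame_wise_labels.headD ""
  let labels0 : List String := if first ∉ bg_class then [first] else []
  let starts0 : List Int := if first ∉ bg_class then [0] else []
  let st := (PySem.List.pyRange 0 (frame_wise_labels.length : Int) 1).foldl
    (aStep bg_class frame_wise_labels) (labels0, starts0, [], first)
  -- after the loop the leftover i is len-1, so ends.append(i+1) appends len
  (st.1, st.2.1, if st.2.2.2 ∉ bg_class then st.2.2.1 ++ [(frame_wise_labels.length : Int)] else st.2.2.1)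

-- ===== PORT B =====
-- Source B's nested whiles as one structural recursion: state = current run label x started
-- at index i, next unchecked index j with suffix list; first branch = the inner `while j`
-- scan, second = close the run (emit the triple unless background) and start a new one.
def bRun (bg_class : List String) : String → List String → Int → Int → List String × List Int × List Int
  | x, [], i, j => if x ∉ bg_class then ([x], [i], [j]) else ([], [], [])
  | x, y :: t, i, j =>
    if y == x then bRun bg_class x t i (j + 1)
    else
      let r := bRun bg_class y t j (j + 1)
      if x ∉ bg_class then (x :: r.1, i :: r.2.1, j :: r.2.2) else r

def get_labels_start_end_time_alt (frame_wise_labels : List String) (bg_class : List String) : List String × List Int × List Int :=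
  match frame_wise_labels with
  | [] => ([], [], [])
  | x :: rest => bRun bg_class x rest 0 1

-- ===== PRECONDITION & SPEC =====
-- Pre_ excludes only the empty frame list, on which Python A raises IndexError (it reads frame_wise_labels[0]).
def Pre_get_labels_start_end_time (frame_wise_labels : List String) (bg_class : List String) : Prop :=
  frame_wise_labels ≠ []
instance (frame_wise_labels : List String) (bg_class : List String) : Decidable (Pre_get_labels_start_end_time frame_wise_labels bg_class) := by unfold Pre_get_labels_start_end_time; infer_instance

def pvWitness_get_labels_start_end_time : List String × List String := (["walk", "walk", "background", "grasp"], ["background"])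

def Spec_get_labels_start_end_time (frame_wise_labels : List String) (bg_class : List String) (out : List String × List Int × List Int) : Prop := out = get_labels_start_end_time_alt frame_wise_labels bg_class
instance (frame_wise_labels : List String) (bg_class : List String) (out : List String × List Int × List Int) : Decidable (Spec_get_labels_start_end_time frame_wise_labels bg_class out) := by unfold Spec_get_labels_start_end_time; infer_instance

-- ===== CLAIM (what is proved, stated in full; the proofs are below) =====
def Claim_equal_get_labels_start_end_time : Prop := ∀ (frame_wise_labels : List String) (bg_class : List String), Dom_get_labels_start_end_time frame_wise_labels bg_class → Pre_get_labels_start_end_time frame_wise_labels bg_class → Spec_get_labels_start_end_time frame_wise_labels bg_class (get_labels_start_end_time frame_wise_labels bg_class)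

-- ===== LEMMAS AND PROOFS =====

-- A's loop body seen on (index, element) pairs
def aStepP (bg_class : List String)
    (s : List String × List Int × List Int × String) (p : Int × String) :
    List String × List Int × List Int × String :=
  if p.2 ≠ s.2.2.2 then
    (if p.2 ∉ bg_class then s.1 ++ [p.2] else s.1,
     if p.2 ∉ bg_class then s.2.1 ++ [p.1] else s.2.1,
     if s.2.2.2 ∉ bg_class then s.2.2.1 ++ [p.1] else s.2.2.1,
     p.2)
  else s

-- A's post-loop finish: append the final end for the still-open run
def afterA (bg_class : List String) (st : List String × List Int × List Int × String)
    (endv : Int) : List String × List Int × List Int :=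
  (st.1, st.2.1, if st.2.2.2 ∉ bg_class then st.2.2.1 ++ [endv] else st.2.2.1)

-- when the run label is not background, bRun's output starts with that label and start
lemma bRun_pending (bg : List String) :
    ∀ (ys : List String) (x : String) (i j : Int), x ∉ bg →
    ∃ l s e, bRun bg x ys i j = (x :: l, i :: s, e) := by
  intro ys
  induction ys with
  | nil => intro x i j hx; exact ⟨[], [], [j], by simp [bRun, hx]⟩
  | cons y t ih =>
    intro x i j hx
    by_cases hy : y = x
    · subst hy
      obtain ⟨l, s, e, h⟩ := ih y i (j + 1) hx
      exact ⟨l, s, e, by simp [bRun, h]⟩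
    · refine ⟨(bRun bg y t j (j + 1)).1, (bRun bg y t j (j + 1)).2.1,
        j :: (bRun bg y t j (j + 1)).2.2, ?_⟩
      simp [bRun, hy, hx]

-- loop invariant: running A's loop from state (la, sa, ea, last) over the remaining
-- frames ys (absolute index idx, pending run started at i₀) and finishing equals the
-- accumulators extended by B's run scan (minus the pending label/start A already holds).
lemma main_inv (bg : List String) :
    ∀ (ys : List String) (idx i₀ : Int) (la : List String) (sa ea : List Int) (last : String),
    afterA bg ((PySem.List.enumerate ys idx).foldl (aStepP bg) (la, sa, ea, last))
      (idx + (ys.length : Int))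
    = (if last ∉ bg then
        (la ++ (bRun bg last ys i₀ idx).1.tail, sa ++ (bRun bg last ys i₀ idx).2.1.tail,
         ea ++ (bRun bg last ys i₀ idx).2.2)
      else
        (la ++ (bRun bg last ys i₀ idx).1, sa ++ (bRun bg last ys i₀ idx).2.1,
         ea ++ (bRun bg last ys i₀ idx).2.2)) := by
  intro ys
  induction ys with
  | nil =>
    intro idx i₀ la sa ea last
    by_cases hl : last ∈ bg <;> simp [PySem.List.enumerate_nil, afterA, bRun, hl]
  | cons y t ih =>
    intro idx i₀ la sa ea last
    rw [PySem.List.enumerate_cons, List.foldl_cons]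
    have hlen : idx + ((y :: t).length : Int) = (idx + 1) + (t.length : Int) := by
      simp only [List.length_cons]; push_cast; ring
    rw [hlen]
    by_cases hy : y = last
    · subst hy
      rw [show aStepP bg (la, sa, ea, y) (idx, y) = (la, sa, ea, y) by simp [aStepP]]
      rw [ih (idx + 1) i₀ la sa ea y]
      simp [bRun]
    · rw [show aStepP bg (la, sa, ea, last) (idx, y)
          = (if y ∉ bg then la ++ [y] else la,
             if y ∉ bg then sa ++ [idx] else sa,
             if last ∉ bg then ea ++ [idx] else ea, y) by simp [aStepP, hy]]
      rw [ih (idx + 1) idx _ _ _ y]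
      have hb : bRun bg last (y :: t) i₀ idx
          = (let r := bRun bg y t idx (idx + 1)
             if last ∉ bg then (last :: r.1, i₀ :: r.2.1, idx :: r.2.2) else r) := by
        simp [bRun, hy]
      by_cases hyb : y ∈ bg <;> by_cases hlb : last ∈ bg
      · simp [hb, hyb, hlb]
      · simp [hb, hyb, hlb]
      · obtain ⟨l, s, e, hr⟩ := bRun_pending bg t y idx (idx + 1) hyb
        simp [hb, hyb, hlb, hr]
      · obtain ⟨l, s, e, hr⟩ := bRun_pending bg t y idx (idx + 1) hyb
        simp [hb, hyb, hlb, hr]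

-- ===== VERDICT (by name: the statement is the Claim_ definition above) =====
theorem get_labels_start_end_time_spec : Claim_equal_get_labels_start_end_time := by
  intro fwl bg _ hpre
  unfold Spec_get_labels_start_end_time
  obtain ⟨x, rest, rfl⟩ : ∃ x rest, fwl = x :: rest := by
    cases fwl with
    | nil => exact absurd rfl hpre
    | cons a l => exact ⟨a, l, rfl⟩
  have hfold : ∀ init, (PySem.List.pyRange 0 ((x :: rest).length : Int) 1).foldl
      (aStep bg (x :: rest)) init
      = (PySem.List.enumerate (x :: rest) 0).foldl (aStepP bg) init := by
    intro init
    rw [PySem.List.enumerate_eq_map_pyRange (d := "")]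
    rw [List.foldl_map]
    simp only [PySem.List.len_eq]
    rfl
  have hA : get_labels_start_end_time (x :: rest) bg
      = afterA bg ((PySem.List.enumerate (x :: rest) 0).foldl (aStepP bg)
          (if x ∉ bg then [x] else [], if x ∉ bg then [0] else [], [], x))
          (0 + ((x :: rest).length : Int)) := by
    unfold get_labels_start_end_time afterA
    rw [← hfold]
    simp
  rw [hA, main_inv bg (x :: rest) 0 0]
  have hstep : bRun bg x (x :: rest) 0 0 = bRun bg x rest 0 1 := by
    simp [bRun]
  unfold get_labels_start_end_time_alt
  by_cases hx : x ∈ bg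
  · simp [hx, hstep]
  · obtain ⟨l, s, e, hr⟩ := bRun_pending bg rest x 0 1 hx
    simp [hx, hstep, hr]
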